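-- pv_equiv track=rewrite | github.com/bigscience-workshop/biomedical | biodatasets/monero/monero.py | _assign_offsets
-- ===== SOURCE A (Python) =====
-- def _assign_offsets(tokens):
--     offsets = []
--     start = 0
--     for t in tokens:
--         s = start
--         e = s + len(t)
--         offsets.append([s, e])
--         start = e + 1  # Add one to include space.
--     return offsets
-- ===== SOURCE B (Python) =====
-- def _assign_offsets(tokens):
--     # Build the output back-to-front: first compute the total length of the
--     # space-joined text, then sweep the tokens in reverse with an END cursor,
--     # and finally reverse the collected pairs.
--     e = sum(len(t) for t in tokens) + len(tokens) - 1
--     out = []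
--     for t in reversed(tokens):
--         out.append([e - len(t), e])
--         e -= len(t) + 1
--     out.reverse()
--     return out
-- ===== Notes on version B (the rewrite author's own statement) =====
-- stated objective: alternative
-- what changed: A sweeps forward with a running START cursor; B first computes the total joined length, then builds the offsets back-to-front by sweeping the tokens in reverse with an END cursor and reversing the result.
import Mathlib
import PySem

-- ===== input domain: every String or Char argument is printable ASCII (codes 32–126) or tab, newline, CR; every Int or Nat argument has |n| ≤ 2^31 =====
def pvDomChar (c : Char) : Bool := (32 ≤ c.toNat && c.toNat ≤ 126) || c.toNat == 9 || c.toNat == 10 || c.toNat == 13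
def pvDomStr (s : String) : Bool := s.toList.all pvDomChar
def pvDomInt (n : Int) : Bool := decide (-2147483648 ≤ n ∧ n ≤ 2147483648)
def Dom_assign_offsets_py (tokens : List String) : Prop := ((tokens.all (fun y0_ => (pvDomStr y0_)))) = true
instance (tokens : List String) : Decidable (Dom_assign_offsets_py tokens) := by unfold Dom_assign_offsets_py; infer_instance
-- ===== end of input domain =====

-- B builds the output back-to-front: total joined length first, then a reverse sweep
-- with an END cursor, then one reversal (alternative decomposition; same cost).

-- ===== PORT A =====
-- for t in tokens: append [start, start+len(t)]; start = end + 1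
def assign_offsets_py (tokens : List String) : List (List Int) :=
  (tokens.foldl
    (fun (st : List (List Int) × Int) t =>
      let s := st.2
      let e := s + PySem.Str.len t
      (st.1 ++ [[s, e]], e + 1))
    ([], 0)).1

-- ===== PORT B =====
-- e = sum(len(t) for t in tokens) + len(tokens) - 1
-- for t in reversed(tokens): out.append([e-len(t), e]); e -= len(t)+1
-- out.reverse(); return out
def assign_offsets_py_alt (tokens : List String) : List (List Int) :=
  let e0 : Int := tokens.foldl (fun a t => a + PySem.Str.len t) 0 + tokens.length - 1
  let out := (tokens.reverse.foldl
    (fun (st : List (List Int) × Int) t =>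
      (st.1 ++ [[st.2 - PySem.Str.len t, st.2]], st.2 - (PySem.Str.len t + 1)))
    ([], e0)).1
  out.reverse

-- ===== PRECONDITION & SPEC =====
def Spec_assign_offsets_py (tokens : List String) (out : List (List Int)) : Prop := out = assign_offsets_py_alt tokens
instance (tokens : List String) (out : List (List Int)) : Decidable (Spec_assign_offsets_py tokens out) := by unfold Spec_assign_offsets_py; infer_instance

-- ===== CLAIM (what is proved, stated in full; the proofs are below) =====
def Claim_equal_assign_offsets_py : Prop := ∀ (tokens : List String), Dom_assign_offsets_py tokens → Spec_assign_offsets_py tokens (assign_offsets_py tokens)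

-- ===== LEMMAS AND PROOFS =====

-- reference: A's offsets of `ts` when the cursor starts at `s`
def pvGo (ts : List String) (s : Int) : List (List Int) :=
  match ts with
  | [] => []
  | t :: ts' => [s, s + PySem.Str.len t] :: pvGo ts' (s + PySem.Str.len t + 1)

-- reference for B's reverse sweep: pairs produced in processing order from end cursor e
def pvBack (ts : List String) (e : Int) : List (List Int) :=
  match ts with
  | [] => []
  | t :: ts' => [e - PySem.Str.len t, e] :: pvBack ts' (e - (PySem.Str.len t + 1))

-- total length of the space-joined tokens plus one trailing unit (= sum of len+1)
def pvCost (ts : List String) : Int := (ts.map (fun t => PySem.Str.len t + 1)).sum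

theorem pvA_fold (ts : List String) (acc : List (List Int)) (s : Int) :
    (ts.foldl
      (fun (st : List (List Int) × Int) t =>
        let s := st.2
        let e := s + PySem.Str.len t
        (st.1 ++ [[s, e]], e + 1))
      (acc, s)).1 = acc ++ pvGo ts s := by
  induction ts generalizing acc s with
  | nil => simp [pvGo]
  | cons t ts ih =>
    simp only [List.foldl_cons]
    rw [ih]
    simp [pvGo]

theorem pvB_fold (ts : List String) (acc : List (List Int)) (e : Int) :
    (ts.foldl
      (fun (st : List (List Int) × Int) t =>
        (st.1 ++ [[st.2 - PySem.Str.len t, st.2]], st.2 - (PySem.Str.len t + 1)))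
      (acc, e)).1 = acc ++ pvBack ts e := by
  induction ts generalizing acc e with
  | nil => simp [pvBack]
  | cons t ts ih =>
    simp only [List.foldl_cons]
    rw [ih]
    simp [pvBack]

theorem pvBack_append (l1 l2 : List String) (e : Int) :
    pvBack (l1 ++ l2) e = pvBack l1 e ++ pvBack l2 (e - pvCost l1) := by
  induction l1 generalizing e with
  | nil => simp [pvBack, pvCost]
  | cons t l1 ih =>
    simp only [List.cons_append, pvBack, ih, pvCost, List.map_cons, List.sum_cons]
    rw [show e - (PySem.Str.len t + 1) - (l1.map (fun t => PySem.Str.len t + 1)).sum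
        = e - (PySem.Str.len t + 1 + (l1.map (fun t => PySem.Str.len t + 1)).sum) from by ring]

theorem pvCost_reverse (ts : List String) : pvCost ts.reverse = pvCost ts := by
  simp [pvCost, List.map_reverse]

-- the reverse sweep, reversed, is A's forward sweep
theorem pvBack_rev (ts : List String) (s : Int) :
    (pvBack ts.reverse (s + pvCost ts - 1)).reverse = pvGo ts s := by
  induction ts generalizing s with
  | nil => simp [pvBack, pvGo, pvCost]
  | cons t ts ih =>
    rw [List.reverse_cons, pvBack_append, pvCost_reverse]
    simp only [pvBack, List.reverse_append, List.reverse_cons, List.reverse_nil,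
      List.nil_append, List.cons_append]
    have hc : pvCost (t :: ts) = PySem.Str.len t + 1 + pvCost ts := by
      simp [pvCost]
    rw [show s + pvCost (t :: ts) - 1 - pvCost ts = s + PySem.Str.len t from by rw [hc]; ring]
    rw [show s + pvCost (t :: ts) - 1 = (s + PySem.Str.len t + 1) + pvCost ts - 1 from by
      rw [hc]; ring]
    rw [ih]
    simp [pvGo]

theorem pvSum_fold (ts : List String) (a : Int) :
    ts.foldl (fun a t => a + PySem.Str.len t) a = a + (ts.map (fun t => PySem.Str.len t)).sum := by
  induction ts generalizing a with
  | nil => simp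
  | cons t ts ih => simp only [List.foldl_cons, ih, List.map_cons, List.sum_cons]; ring

theorem pvCost_eq (ts : List String) :
    pvCost ts = (ts.map (fun t => PySem.Str.len t)).sum + ts.length := by
  induction ts with
  | nil => simp [pvCost]
  | cons t ts ih => simp only [pvCost, List.map_cons, List.sum_cons, List.length_cons] at *
                    push_cast
                    omega

-- ===== VERDICT (by name: the statement is the Claim_ definition above) =====
theorem assign_offsets_py_spec : Claim_equal_assign_offsets_py := by
  intro tokens _
  unfold Spec_assign_offsets_py assign_offsets_py
  simp only [assign_offsets_py_alt]
  rw [pvA_fold, pvB_fold, pvSum_fold]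
  simp only [List.nil_append]
  rw [show (0:Int) + (tokens.map (fun t => PySem.Str.len t)).sum + (tokens.length : Int) - 1
      = 0 + pvCost tokens - 1 from by rw [pvCost_eq]; ring]
  exact (pvBack_rev tokens 0).symm
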